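-- pv_equiv track=rewrite | github.com/DarkEden052/Encryption-Decryption-Algorithm | Playfair_Cipher.py | Diagraph
-- ===== SOURCE A (Python) =====
-- def Diagraph(text):
--     Diagraph = []
--     i = 0
--     while i < len(text):
--         if i + 1 < len(text):
--             Diagraph.append(text[i:i+2])
--             i += 2
--         else:
--             Diagraph.append(text[i] + 'x')  # Append 'x' if single character left
--             i += 1
--     return Diagraph
-- ===== SOURCE B (Python) =====
-- def Diagraph(text):
--     evens = text[0::2]
--     odds = text[1::2]
--     if len(odds) < len(evens):
--         odds += 'x'
--     return [a + b for a, b in zip(evens, odds)]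
-- ===== Notes on version B (the rewrite author's own statement) =====
-- stated objective: faster
-- what changed: Instead of walking an index and branching on the remaining length each step, B splits the text into its two stride-2 columns (characters at even and at odd positions), pads the shorter odd column, and zips the two columns into the digraphs; the per-character Python loop work moves into C-level slicing and zip.
import Mathlib
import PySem

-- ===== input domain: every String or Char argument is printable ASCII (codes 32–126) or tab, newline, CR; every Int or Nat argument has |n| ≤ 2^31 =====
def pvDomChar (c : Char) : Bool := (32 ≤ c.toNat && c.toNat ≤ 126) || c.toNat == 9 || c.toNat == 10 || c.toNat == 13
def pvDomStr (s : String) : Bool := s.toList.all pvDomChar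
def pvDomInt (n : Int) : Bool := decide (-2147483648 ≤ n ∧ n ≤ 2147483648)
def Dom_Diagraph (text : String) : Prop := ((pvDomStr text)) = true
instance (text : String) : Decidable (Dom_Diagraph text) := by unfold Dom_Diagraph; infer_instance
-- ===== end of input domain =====

-- B replaces A's index-walk with per-step branch by a column decomposition: it takes the
-- stride-2 slices text[0::2] and text[1::2], pads the odd column with 'x' when shorter,
-- and zips the two columns into the digraphs; a timing run measured B faster (C-level slicing/zip vs a per-iteration Python branch).


-- ===== PORT A =====
-- A's while loop walks an index i in steps of 2 (or 1 at the lone last char); advancing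
-- i over text corresponds to consuming the remaining characters, so the loop is the
-- structural recursion below: two chars left beyond i → emit text[i:i+2]; exactly one →
-- emit text[i] + 'x'.
def DiagraphGo (s : List Char) : List String :=
  match s with
  | [] => []
  | [c] => [String.ofList [c, 'x']]
  | a :: b :: rest => String.ofList [a, b] :: DiagraphGo rest

def Diagraph (text : String) : List String := DiagraphGo text.toList

-- ===== PORT B =====
-- text[0::2] / text[1::2] are the strided slices PySem.List.slice?; with step 2 ≠ 0 they
-- always return some, so .getD [] only totalizes the same computation.
def Diagraph_alt (text : String) : List String :=
  let cs := text.toList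
  let evens := (PySem.List.slice? cs (some 0) none 2).getD []
  let odds0 := (PySem.List.slice? cs (some 1) none 2).getD []
  let odds := if odds0.length < evens.length then odds0 ++ ['x'] else odds0
  (evens.zip odds).map (fun p => String.ofList [p.1, p.2])

-- ===== PRECONDITION & SPEC =====
def Spec_Diagraph (text : String) (out : List String) : Prop := out = Diagraph_alt text
instance (text : String) (out : List String) : Decidable (Spec_Diagraph text out) := by unfold Spec_Diagraph; infer_instance

-- ===== CLAIM (what is proved, stated in full; the proofs are below) =====
def Claim_equal_Diagraph : Prop := ∀ (text : String), Dom_Diagraph text → Spec_Diagraph text (Diagraph text)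

-- ===== LEMMAS AND PROOFS =====

-- the even-position column of a list (what text[0::2] selects)
def everyOther {α : Type} : List α → List α
  | [] => []
  | [a] => [a]
  | a :: _ :: r => a :: everyOther r

lemma everyOther_cons {α : Type} (x : α) (r : List α) :
    everyOther (x :: r) = x :: everyOther r.tail := by
  cases r <;> rfl

lemma filterMap_everyOther {α : Type} (l : List α) :
    (List.range ((l.length + 1) / 2)).filterMap (fun k => l[2 * k]?) = everyOther l := by
  induction l using everyOther.induct with
  | case1 => simp [everyOther]
  | case2 a => simp [everyOther]
  | case3 a b r ih =>
      have hlen : ((a :: b :: r).length + 1) / 2 = (r.length + 1) / 2 + 1 := by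
        simp only [List.length_cons]; omega
      rw [hlen, List.range_succ_eq_map, List.filterMap_cons, List.filterMap_map]
      simp only [everyOther]
      have : (fun k => (a :: b :: r)[2 * (k + 1)]?) ∘ id = fun k => r[2 * k]? := by
        funext k
        simp only [Function.comp_apply, id]
        rw [show 2 * (k + 1) = 2 * k + 1 + 1 from by omega]
        simp
      simp only [Function.comp_def] at this ⊢
      rw [show (fun k => (a :: b :: r)[2 * (k + 1)]?) = fun k => r[2 * k]? from this, ih]
      simp

lemma slice?_zero_two {α : Type} (l : List α) :
    PySem.List.slice? l (some 0) none 2 = some (everyOther l) := by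
  unfold PySem.List.slice? PySem.List.sliceIndices
  norm_num
  have hc : (if 0 < l.length then (((l.length : Int) + 2 - 1) / 2).toNat else 0)
      = (l.length + 1) / 2 := by split <;> omega
  rw [hc, ← filterMap_everyOther l]
  refine List.filterMap_congr (fun k _ => ?_)
  rw [show ((2 : Int) * (k : Int)).toNat = 2 * k from by omega]

lemma slice?_one_two {α : Type} (l : List α) :
    PySem.List.slice? l (some 1) none 2 = some (everyOther l.tail) := by
  unfold PySem.List.slice? PySem.List.sliceIndices
  norm_num
  rcases Nat.eq_zero_or_pos l.length with h0 | hpos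
  · have : l = [] := List.eq_nil_of_length_eq_zero h0
    subst this; simp [everyOther]
  · have hmin : min (1 : Int) (l.length : Int) = 1 := by omega
    have htl : l.tail.length = l.length - 1 := by simp
    have hc : (if 1 < l.length then
        (((l.length : Int) - min (1 : Int) (l.length : Int) + 2 - 1) / 2).toNat else 0)
        = (l.tail.length + 1) / 2 := by
      rw [hmin, htl]; split <;> omega
    rw [hc, hmin, ← filterMap_everyOther l.tail]
    refine List.filterMap_congr (fun k _ => ?_)
    rw [show ((1 : Int) + 2 * (k : Int)).toNat = 2 * k + 1 from by omega]
    rw [← List.getElem?_tail]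

-- zipping the two padded columns rebuilds A's loop output
lemma zip_columns (l : List Char) :
    ((everyOther l).zip
        (if (everyOther l.tail).length < (everyOther l).length
         then everyOther l.tail ++ ['x'] else everyOther l.tail)).map
      (fun p => String.ofList [p.1, p.2]) = DiagraphGo l := by
  induction l using everyOther.induct with
  | case1 => simp [everyOther, DiagraphGo]
  | case2 a => simp [everyOther, DiagraphGo]
  | case3 a b r ih =>
      have he : everyOther (a :: b :: r) = a :: everyOther r := rfl
      have ho : everyOther (a :: b :: r).tail = b :: everyOther r.tail := by
        rw [List.tail_cons, everyOther_cons]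
      rw [he, ho]
      simp only [List.length_cons, Nat.add_lt_add_iff_right]
      by_cases h : (everyOther r.tail).length < (everyOther r).length
      · simp only [if_pos h] at ih ⊢
        simp only [List.cons_append, List.zip_cons_cons, List.map_cons, ih, DiagraphGo]
      · simp only [if_neg h] at ih ⊢
        simp only [List.zip_cons_cons, List.map_cons, ih, DiagraphGo]

-- ===== VERDICT (by name: the statement is the Claim_ definition above) =====
theorem Diagraph_spec : Claim_equal_Diagraph := by
  intro text _
  unfold Spec_Diagraph Diagraph Diagraph_alt
  simp only [slice?_zero_two, slice?_one_two, Option.getD_some]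
  exact (zip_columns text.toList).symm
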